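-- pv_equiv track=rewrite | github.com/Mnogoznall2405/itinvent | agent.py | _select_outlook_stores_for_user
-- ===== SOURCE A (Python) =====
-- from typing import Any, Dict, List, Optional, Sequence, Tuple
--
-- def _select_outlook_stores_for_user(stores: List[Dict[str, Any]], user_login: str) -> List[Dict[str, Any]]:
--     if not stores:
--         return []
--     login = extract_login_name(user_login).lower()
--     if not login:
--         return list(stores)
--     marker = f"\\users\\{login}\\"
--     selected = [row for row in stores if marker in sanitize_text(row.get("path")).lower()]
--     if selected:
--         return selected
--     selected = [row for row in stores if sanitize_text(row.get("profile_name")).lower() == login]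
--     if selected:
--         return selected
--     return list(stores)
--
-- def sanitize_text(value: Any) -> str:
--     return str(value or "").replace("\x00", "").strip()
--
-- def normalize_user_name(value: str) -> str:
--     normalized = sanitize_text(value).strip().strip('"')
--     return normalized
--
-- def extract_login_name(value: str) -> str:
--     normalized = normalize_user_name(value)
--     if "\\" in normalized:
--         return normalize_user_name(normalized.split("\\", 1)[1])
--     if "@" in normalized:
--         return normalize_user_name(normalized.split("@", 1)[0])
--     return normalized
-- ===== SOURCE B (Python) =====
-- def sanitize_text(value):
--     return str(value or "").replace("\x00", "").strip()
--
-- def normalize_user_name(value):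
--     normalized = sanitize_text(value).strip().strip('"')
--     return normalized
--
-- def extract_login_name(value):
--     normalized = normalize_user_name(value)
--     if "\\" in normalized:
--         return normalize_user_name(normalized.split("\\", 1)[1])
--     if "@" in normalized:
--         return normalize_user_name(normalized.split("@", 1)[0])
--     return normalized
--
-- def _select_outlook_stores_for_user(stores, user_login):
--     # rank-based argmin-group selection: rank each row 0 (path match),
--     # 1 (profile match) or 2 (no match); return the group with minimal rank.
--     if not stores:
--         return []
--     login = extract_login_name(user_login).lower()
--     if not login:
--         return list(stores)
--     marker = f"\\users\\{login}\\"
--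
--     def rank(row):
--         if marker in sanitize_text(row.get("path")).lower():
--             return 0
--         if sanitize_text(row.get("profile_name")).lower() == login:
--             return 1
--         return 2
--
--     ranks = [rank(row) for row in stores]
--     best = min(ranks)
--     return [row for row, r in zip(stores, ranks) if r == best]
-- ===== Notes on version B (the rewrite author's own statement) =====
-- stated objective: alternative
-- what changed: A uses staged fallback filters (path scan; if empty, profile scan; if empty, all stores); B assigns each row a rank 0/1/2 (path match / profile match / none), takes the minimum rank, and returns the group of rows with that minimal rank.
import Mathlib
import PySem

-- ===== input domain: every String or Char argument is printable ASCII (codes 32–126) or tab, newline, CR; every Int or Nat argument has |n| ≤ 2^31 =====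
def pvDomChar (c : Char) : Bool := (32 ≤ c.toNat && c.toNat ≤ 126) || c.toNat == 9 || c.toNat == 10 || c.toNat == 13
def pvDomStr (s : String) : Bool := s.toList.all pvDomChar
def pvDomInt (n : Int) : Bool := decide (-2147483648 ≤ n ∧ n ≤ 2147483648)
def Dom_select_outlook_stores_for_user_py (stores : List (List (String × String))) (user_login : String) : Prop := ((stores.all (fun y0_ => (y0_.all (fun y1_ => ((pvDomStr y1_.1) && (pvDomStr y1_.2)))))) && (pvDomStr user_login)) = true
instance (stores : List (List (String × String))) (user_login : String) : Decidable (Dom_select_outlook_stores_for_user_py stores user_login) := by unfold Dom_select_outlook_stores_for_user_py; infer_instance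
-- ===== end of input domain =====

-- B replaces A's staged fallback filters (path scan, then profile scan, then all) by a
-- rank-based argmin-group selection: rank each row 0/1/2 once, take the minimal rank,
-- return the rows of that rank group.  Same result, alternative algorithm.

-- ===== PORT A =====
-- shared helpers (same-module helpers of the Python file, used identically by A and B)

-- sanitize_text(value) for value : Option String ('value or ""' → getD "")
def pvSanitize (v : Option String) : String :=
  PySem.Str.strip (PySem.Str.replace (v.getD "") "\x00" "")

def pvNormalize (v : String) : String :=
  PySem.Str.stripChars (PySem.Str.strip (pvSanitize (some v))) "\""

def pvExtractLogin (v : String) : String :=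
  let normalized := pvNormalize v
  if PySem.Str.isIn "\\" normalized then
    pvNormalize ((((PySem.Str.splitMax? normalized "\\" 1).getD [])[1]?).getD "")
  else if PySem.Str.isIn "@" normalized then
    pvNormalize ((((PySem.Str.splitMax? normalized "@" 1).getD [])[0]?).getD "")
  else normalized

def pvPathHit (marker : String) (row : List (String × String)) : Bool :=
  PySem.Str.isIn marker (PySem.Str.lower (pvSanitize ((PySem.Dict.mk row).get? "path")))

def pvProfileHit (login : String) (row : List (String × String)) : Bool :=
  PySem.Str.lower (pvSanitize ((PySem.Dict.mk row).get? "profile_name")) == login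

def select_outlook_stores_for_user_py (stores : List (List (String × String))) (user_login : String) : List (List (String × String)) :=
  if stores = [] then []
  else
    let login := PySem.Str.lower (pvExtractLogin user_login)
    if login = "" then stores
    else
      let marker := "\\users\\" ++ login ++ "\\"
      let selected := stores.filter (pvPathHit marker)
      if selected ≠ [] then selected
      else
        let selected2 := stores.filter (pvProfileHit login)
        if selected2 ≠ [] then selected2
        else stores

-- ===== PORT B =====
-- rank(row): 0 = path match, 1 = profile match, 2 = no match
def pvRank (marker login : String) (row : List (String × String)) : Int :=
  if pvPathHit marker row then 0
  else if pvProfileHit login row then 1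
  else 2

def select_outlook_stores_for_user_py_alt (stores : List (List (String × String))) (user_login : String) : List (List (String × String)) :=
  if stores = [] then []
  else
    let login := PySem.Str.lower (pvExtractLogin user_login)
    if login = "" then stores
    else
      let marker := "\\users\\" ++ login ++ "\\"
      let ranks := stores.map (pvRank marker login)
      -- min(ranks): ranks is nonempty here, so min? returns some; getD is a totality guard
      let best := (PySem.List.min? ranks (fun x => x)).getD 0
      ((stores.zip ranks).filter (fun p => p.2 == best)).map Prod.fst

-- ===== PRECONDITION & SPEC =====
def Spec_select_outlook_stores_for_user_py (stores : List (List (String × String))) (user_login : String) (out : List (List (String × String))) : Prop := out = select_outlook_stores_for_user_py_alt stores user_login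
instance (stores : List (List (String × String))) (user_login : String) (out : List (List (String × String))) : Decidable (Spec_select_outlook_stores_for_user_py stores user_login out) := by unfold Spec_select_outlook_stores_for_user_py; infer_instance

-- ===== CLAIM (what is proved, stated in full; the proofs are below) =====
def Claim_equal_select_outlook_stores_for_user_py : Prop := ∀ (stores : List (List (String × String))) (user_login : String), Dom_select_outlook_stores_for_user_py stores user_login → Spec_select_outlook_stores_for_user_py stores user_login (select_outlook_stores_for_user_py stores user_login)

-- ===== LEMMAS AND PROOFS =====

-- selecting by rank from the zipped list is filtering by rank
theorem pvZipFilter {α : Type} (f : α → Int) (b : Int) (l : List α) :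
    ((l.zip (l.map f)).filter (fun p => p.2 == b)).map Prod.fst
      = l.filter (fun x => f x == b) := by
  induction l with
  | nil => rfl
  | cons x xs ih =>
    by_cases h : f x == b <;> simp [h, ih]

-- rank 0 ↔ path hit; rank 1 ↔ (no path hit ∧ profile hit); rank 2 ↔ neither
theorem pvRank_eq_zero (marker login : String) (r : List (String × String)) :
    (pvRank marker login r == 0) = pvPathHit marker r := by
  unfold pvRank; by_cases h1 : pvPathHit marker r <;>
    by_cases h2 : pvProfileHit login r <;> simp [h1, h2]

theorem pvCore (marker login : String) (stores : List (List (String × String)))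
    (hne : stores ≠ []) :
    (let selected := stores.filter (pvPathHit marker)
     if selected ≠ [] then selected
     else
       let selected2 := stores.filter (pvProfileHit login)
       if selected2 ≠ [] then selected2
       else stores)
    = (let ranks := stores.map (pvRank marker login)
       let best := (PySem.List.min? ranks (fun x => x)).getD 0
       ((stores.zip ranks).filter (fun p => p.2 == best)).map Prod.fst) := by
  simp only
  rw [pvZipFilter]
  have hm : ∃ m, PySem.List.min? (stores.map (pvRank marker login)) (fun x => x) = some m := by
    cases h : PySem.List.min? (stores.map (pvRank marker login)) (fun x => x) with
    | none =>
      exfalso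
      have := (PySem.List.min?_eq_none_iff
        (xs := stores.map (pvRank marker login)) (key := fun x => x)).mp h
      exact hne (List.map_eq_nil_iff.mp this)
    | some m => exact ⟨m, rfl⟩
  obtain ⟨m, hm⟩ := hm
  have hmem : m ∈ stores.map (pvRank marker login) := PySem.List.min?_mem hm
  have hmin : ∀ y ∈ stores.map (pvRank marker login), m ≤ y := by
    intro y hy; exact PySem.List.min?_isMin hm y hy
  rw [hm]
  simp only [Option.getD_some]
  by_cases hp : stores.filter (pvPathHit marker) ≠ []
  · -- some path hit: m = 0 and rank-0 rows are exactly the path hits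
    have ⟨x, hx, hxp⟩ : ∃ x ∈ stores, pvPathHit marker x := by
      rcases List.exists_mem_of_ne_nil _ hp with ⟨x, hx⟩
      rw [List.mem_filter] at hx; exact ⟨x, hx.1, hx.2⟩
    have hm0 : m = 0 := by
      have h1 : m ≤ 0 := by
        have := hmin (pvRank marker login x) (List.mem_map_of_mem hx)
        simpa [pvRank, hxp] using this
      have h2 : (0:Int) ≤ m := by
        rcases List.mem_map.mp hmem with ⟨y, _, hy⟩
        subst hy; unfold pvRank; split_ifs <;> omega
      omega
    subst hm0
    simp only [if_pos hp]
    apply List.filter_congr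
    intro r _
    exact (pvRank_eq_zero marker login r).symm
  · rw [ne_eq, not_not] at hp
    have hnopath : ∀ x ∈ stores, ¬ pvPathHit marker x = true := by
      intro x hx; exact List.filter_eq_nil_iff.mp hp x hx
    by_cases hq : stores.filter (pvProfileHit login) ≠ []
    · -- no path hit, some profile hit: m = 1 and rank-1 rows are the profile hits
      have ⟨x, hx, hxq⟩ : ∃ x ∈ stores, pvProfileHit login x := by
        rcases List.exists_mem_of_ne_nil _ hq with ⟨x, hx⟩
        rw [List.mem_filter] at hx; exact ⟨x, hx.1, hx.2⟩
      have hm1 : m = 1 := by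
        have h1 : m ≤ 1 := by
          have := hmin (pvRank marker login x) (List.mem_map_of_mem hx)
          simpa [pvRank, hnopath x hx, hxq] using this
        have h2 : (1:Int) ≤ m := by
          rcases List.mem_map.mp hmem with ⟨y, hy, hye⟩
          subst hye; unfold pvRank
          rw [if_neg (hnopath y hy)]
          split_ifs <;> omega
        omega
      subst hm1
      simp only [hp, ne_eq, not_true_eq_false, if_false, if_pos hq]
      apply List.filter_congr
      intro r hr
      unfold pvRank
      simp only [hnopath r hr]
      by_cases h2 : pvProfileHit login r <;> simp [h2]
    · -- neither: every rank is 2, the whole list is returned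
      rw [ne_eq, not_not] at hq
      have hnoprof : ∀ x ∈ stores, ¬ pvProfileHit login x = true := by
        intro x hx; exact List.filter_eq_nil_iff.mp hq x hx
      have hm2 : m = 2 := by
        rcases List.mem_map.mp hmem with ⟨y, hy, hye⟩
        subst hye; unfold pvRank
        simp [hnopath y hy, hnoprof y hy]
      subst hm2
      simp only [hp, hq, ne_eq, not_true_eq_false, if_false]
      symm
      rw [List.filter_eq_self]
      intro r hr
      unfold pvRank
      simp [hnopath r hr, hnoprof r hr]

-- ===== VERDICT (by name: the statement is the Claim_ definition above) =====
theorem select_outlook_stores_for_user_py_spec : Claim_equal_select_outlook_stores_for_user_py := by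
  intro stores user_login _
  show select_outlook_stores_for_user_py stores user_login = select_outlook_stores_for_user_py_alt stores user_login
  unfold select_outlook_stores_for_user_py select_outlook_stores_for_user_py_alt
  by_cases hs : stores = []
  · simp [hs]
  · simp only [if_neg hs]
    by_cases hl : PySem.Str.lower (pvExtractLogin user_login) = ""
    · simp [hl]
    · simp only [if_neg hl]
      exact pvCore _ _ stores hs
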